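-- pv_equiv track=rewrite | github.com/kun63/algorithms | hw6/knapsack_bounded.py | mod_string_1
-- ===== SOURCE A (Python) =====
-- def mod_string_1(items,a,i):
--     count=0
--     index=0
--     for _, _, c_i in items:
--         count += c_i
--         if i <= count:
--             a[index]+=1
--             break
--         else:
--             index+=1
--
--     return a
-- ===== SOURCE B (Python) =====
-- def mod_string_1(items, a, i):
--     counts = [c for _, _, c in items]
--     prefix = [sum(counts[:j + 1]) for j in range(len(counts))]
--     matches = [j for j, p in enumerate(prefix) if i <= p]
--     if matches:
--         a[matches[0]] += 1
--     return a
-- ===== Notes on version B (the rewrite author's own statement) =====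
-- stated objective: alternative
-- what changed: Replaces the accumulate-and-break scan by a table-based formulation: build the prefix-sum table, collect all bucket indices whose prefix sum reaches i, and increment at the first one.
import Mathlib
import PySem

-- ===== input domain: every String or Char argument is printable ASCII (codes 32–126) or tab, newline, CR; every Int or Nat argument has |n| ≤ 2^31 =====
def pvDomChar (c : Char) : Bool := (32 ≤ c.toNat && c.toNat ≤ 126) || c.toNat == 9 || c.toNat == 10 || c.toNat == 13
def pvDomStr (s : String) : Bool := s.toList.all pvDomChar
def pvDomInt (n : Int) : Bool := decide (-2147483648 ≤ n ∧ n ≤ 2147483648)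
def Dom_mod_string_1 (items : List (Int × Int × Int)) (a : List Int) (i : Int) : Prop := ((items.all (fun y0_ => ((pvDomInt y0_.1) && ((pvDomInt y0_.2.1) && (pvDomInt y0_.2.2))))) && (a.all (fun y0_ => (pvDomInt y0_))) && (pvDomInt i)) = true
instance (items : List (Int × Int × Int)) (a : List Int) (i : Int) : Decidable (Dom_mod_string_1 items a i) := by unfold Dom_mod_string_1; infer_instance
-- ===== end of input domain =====

-- B replaces A's accumulate-and-break scan by building the prefix-sum table, collecting the
-- qualifying bucket indices, and incrementing at the first one (objective: alternative).
-- Both A and B mutate `a` in place in Python; the theorems below are about the returned list.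

-- ===== PORT A =====
-- the for-loop of A: state = (running count, running index); `break` returns immediately
def pvLoopA : List (Int × Int × Int) → Int → Nat → Int → List Int → List Int
  | [], _, _, _, a => a
  | t :: rest, count, index, i, a =>
    let count' := count + t.2.2
    if i ≤ count' then a.modify index (· + 1)
    else pvLoopA rest count' (index + 1) i a

def mod_string_1 (items : List (Int × Int × Int)) (a : List Int) (i : Int) : List Int :=
  pvLoopA items 0 0 i a

-- ===== PORT B =====
def mod_string_1_alt (items : List (Int × Int × Int)) (a : List Int) (i : Int) : List Int :=
  let counts := items.map (fun t => t.2.2)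
  let pref := (List.range counts.length).map (fun j => (counts.take (j + 1)).sum)
  let hits := ((PySem.List.enumerate pref 0).filter (fun jp => decide (i ≤ jp.2))).map (·.1)
  match hits with
  | [] => a
  | j :: _ => a.modify j.toNat (· + 1)

-- ===== PRECONDITION & SPEC =====
-- cumulative count of the first (j+1) items, used only to state Pre_
def pvPsum (items : List (Int × Int × Int)) (j : Nat) : Int :=
  ((items.take (j + 1)).map (fun t => t.2.2)).sum

-- Pre_ excludes exactly the inputs where Python A raises IndexError: the first bucket index j
-- whose cumulative count reaches i lies beyond len(a) (Python B raises there as well).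
def Pre_mod_string_1 (items : List (Int × Int × Int)) (a : List Int) (i : Int) : Prop :=
  ∀ j : Nat, j < items.length →
    (i ≤ pvPsum items j ∧ ∀ k : Nat, k < j → pvPsum items k < i) → j < a.length
instance (items : List (Int × Int × Int)) (a : List Int) (i : Int) : Decidable (Pre_mod_string_1 items a i) := by unfold Pre_mod_string_1; infer_instance

def pvWitness_mod_string_1 : (List (Int × Int × Int)) × List Int × Int :=
  ([(1, 1, 2), (2, 3, 1)], [0, 0], 3)

def Spec_mod_string_1 (items : List (Int × Int × Int)) (a : List Int) (i : Int) (out : List Int) : Prop := out = mod_string_1_alt items a i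
instance (items : List (Int × Int × Int)) (a : List Int) (i : Int) (out : List Int) : Decidable (Spec_mod_string_1 items a i out) := by unfold Spec_mod_string_1; infer_instance

-- ===== CLAIM (what is proved, stated in full; the proofs are below) =====
def Claim_equal_mod_string_1 : Prop := ∀ (items : List (Int × Int × Int)) (a : List Int) (i : Int), Dom_mod_string_1 items a i → Pre_mod_string_1 items a i → Spec_mod_string_1 items a i (mod_string_1 items a i)

-- ===== LEMMAS AND PROOFS =====

-- the index of the first count whose running total (starting from c) reaches i
def pvFirst (i : Int) : List Int → Int → Option Nat
  | [], _ => none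
  | x :: rest, c =>
    if i ≤ c + x then some 0 else (pvFirst i rest (c + x)).map (· + 1)

-- the prefix-sum table Source B builds
def pvPrefix (counts : List Int) : List Int :=
  (List.range counts.length).map (fun j => (counts.take (j + 1)).sum)

theorem pvLoopA_eq (i : Int) (items : List (Int × Int × Int)) :
    ∀ (c : Int) (idx : Nat) (a : List Int),
      pvLoopA items c idx i a =
        match pvFirst i (items.map (fun t => t.2.2)) c with
        | none => a
        | some k => a.modify (idx + k) (· + 1) := by
  induction items with
  | nil => intro c idx a; simp [pvLoopA, pvFirst]
  | cons t rest ih =>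
    intro c idx a
    by_cases h : i ≤ c + t.2.2
    · simp [pvLoopA, pvFirst, h]
    · simp only [pvLoopA, pvFirst, List.map_cons, if_neg h]
      rw [ih]
      cases hf : pvFirst i (rest.map (fun t => t.2.2)) (c + t.2.2) with
      | none => simp
      | some k => simp [Nat.add_assoc, Nat.add_comm 1 k]

theorem pvPrefix_cons (x : Int) (cs : List Int) :
    pvPrefix (x :: cs) = x :: (pvPrefix cs).map (fun p => x + p) := by
  simp only [pvPrefix, List.length_cons, List.range_succ_eq_map, List.map_cons, List.map_map,
    List.cons.injEq]
  refine ⟨by simp, ?_⟩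
  apply List.map_congr_left
  intro j _
  simp [Function.comp, List.take_succ_cons]

theorem pvHead_filter_enumerate (i : Int) (l : List Int) :
    ∀ s : Int,
      ((((PySem.List.enumerate l s).filter (fun jp => decide (i ≤ jp.2))).map (·.1)).head?) =
        (List.findIdx? (fun p => decide (i ≤ p)) l).map (fun k => s + (k : Int)) := by
  induction l with
  | nil => intro s; simp [PySem.List.enumerate]
  | cons x rest ih =>
    intro s
    rw [PySem.List.enumerate_cons, List.findIdx?_cons]
    by_cases h : i ≤ x
    · simp [h]
    · simp only [List.filter_cons, h, decide_false, Bool.false_eq_true, ite_false]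
      rw [ih (s + 1)]
      cases hf : List.findIdx? (fun p => decide (i ≤ p)) rest with
      | none => simp
      | some k => simp; omega

theorem pvFindIdx_prefix (i : Int) (cs : List Int) :
    ∀ c : Int,
      List.findIdx? (fun p => decide (i ≤ c + p)) (pvPrefix cs) = pvFirst i cs c := by
  induction cs with
  | nil => intro c; simp [pvPrefix, pvFirst]
  | cons x rest ih =>
    intro c
    rw [pvPrefix_cons, List.findIdx?_cons, List.findIdx?_map]
    have hc : ((fun p => decide (i ≤ c + p)) ∘ fun p => x + p) =
        (fun p => decide (i ≤ (c + x) + p)) := by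
      funext p; simp [Function.comp, add_assoc]
    rw [hc, ih (c + x)]
    simp [pvFirst]

-- ===== VERDICT (by name: the statement is the Claim_ definition above) =====
theorem pvHead_eq_first (i : Int) (cs : List Int) :
    ((((PySem.List.enumerate (pvPrefix cs) 0).filter (fun jp => decide (i ≤ jp.2))).map (·.1)).head?) =
      (pvFirst i cs 0).map (fun k => (k : Int)) := by
  rw [pvHead_filter_enumerate i (pvPrefix cs) 0]
  have hfz : (fun p : Int => decide (i ≤ p)) = (fun p : Int => decide (i ≤ 0 + p)) := by
    funext p; simp
  rw [hfz, pvFindIdx_prefix i cs 0]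
  simp

theorem mod_string_1_spec : Claim_equal_mod_string_1 := by
  intro items a i _ _
  unfold Spec_mod_string_1
  have halt : mod_string_1_alt items a i =
      match (((PySem.List.enumerate (pvPrefix (items.map (fun t => t.2.2))) 0).filter
          (fun jp => decide (i ≤ jp.2))).map (·.1)) with
      | [] => a
      | j :: _ => a.modify j.toNat (· + 1) := rfl
  rw [halt]
  unfold mod_string_1
  rw [pvLoopA_eq]
  have hhead := pvHead_eq_first i (items.map (fun t => t.2.2))
  cases hf : pvFirst i (items.map (fun t => t.2.2)) 0 with
  | none =>
    rw [hf] at hhead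
    cases hm : (((PySem.List.enumerate (pvPrefix (items.map (fun t => t.2.2))) 0).filter
        (fun jp => decide (i ≤ jp.2))).map (·.1)) with
    | nil => rfl
    | cons j t => rw [hm] at hhead; simp at hhead
  | some k =>
    rw [hf] at hhead
    cases hm : (((PySem.List.enumerate (pvPrefix (items.map (fun t => t.2.2))) 0).filter
        (fun jp => decide (i ≤ jp.2))).map (·.1)) with
    | nil => rw [hm] at hhead; simp at hhead
    | cons j t =>
      rw [hm] at hhead
      simp at hhead
      simp [hhead]
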